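-- pv_equiv track=rewrite | github.com/EuniceGeorge/alx-higher_level_programming | 0x03-python-data_structures/8-multiple_returns.py | multiple_returns
-- ===== SOURCE A (Python) =====
-- def multiple_returns(sentence):
--     string = []
--     length = len(sentence)
--     if length == 0:
--         string.append(None)
--         value = length, string[0]
--         return (value)
--     else:
--         for i in sentence:
--             string.append(i)
--             value = length, string[0]
--             return (value)
-- ===== SOURCE B (Python) =====
-- def multiple_returns(sentence):
--     length = 0
--     first = None
--     for ch in sentence:
--         if length == 0:
--             first = ch
--         length += 1
--     return (length, first)
-- ===== Notes on version B (the rewrite author's own statement) =====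
-- stated objective: alternative
-- what changed: Replaces A's len() call, list accumulator and loop-that-returns-on-its-first-iteration with a single fold over the characters that counts the length and captures the first character in one accumulator pass.
import Mathlib
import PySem

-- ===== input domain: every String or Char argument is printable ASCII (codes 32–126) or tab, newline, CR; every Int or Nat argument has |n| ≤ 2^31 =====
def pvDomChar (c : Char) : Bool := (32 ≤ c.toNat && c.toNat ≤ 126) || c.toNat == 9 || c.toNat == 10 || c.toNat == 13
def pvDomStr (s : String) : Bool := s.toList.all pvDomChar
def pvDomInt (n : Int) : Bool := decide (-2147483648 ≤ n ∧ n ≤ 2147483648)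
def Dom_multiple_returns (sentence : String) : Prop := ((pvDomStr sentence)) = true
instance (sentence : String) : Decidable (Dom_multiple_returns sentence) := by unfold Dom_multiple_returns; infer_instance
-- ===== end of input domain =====

-- B replaces A's len() + list accumulator + first-iteration-return loop with one fold that
-- counts the length and captures the first character in a single pass (alternative decomposition).

-- ===== PORT A =====
-- loop body: append the char to `string`, set value = (length, string[0]), return it.
def multipleReturnsLoop (length : Int) (string : List (Option String)) : List Char → Int × Option String
  | [] => (length, none)   -- unreachable: the loop is only entered when the string is nonempty
  | i :: _ =>
    let string := string ++ [some (String.singleton i)]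
    (length, (PySem.List.pyGet? string 0).join)

def multiple_returns (sentence : String) : Int × Option String :=
  let string : List (Option String) := []
  let length : Int := PySem.Str.len sentence
  if length = 0 then
    let string := string ++ [none]
    (length, (PySem.List.pyGet? string 0).join)
  else
    multipleReturnsLoop length string sentence.toList

-- ===== PORT B =====
def multipleReturnsAltStep (acc : Int × Option String) (ch : Char) : Int × Option String :=
  (acc.1 + 1, if acc.1 = 0 then some (String.singleton ch) else acc.2)

def multiple_returns_alt (sentence : String) : Int × Option String :=
  sentence.toList.foldl multipleReturnsAltStep (0, none)

-- ===== PRECONDITION & SPEC =====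
def Spec_multiple_returns (sentence : String) (out : Int × Option String) : Prop := out = multiple_returns_alt sentence
instance (sentence : String) (out : Int × Option String) : Decidable (Spec_multiple_returns sentence out) := by unfold Spec_multiple_returns; infer_instance

-- ===== CLAIM (what is proved, stated in full; the proofs are below) =====
def Claim_equal_multiple_returns : Prop := ∀ (sentence : String), Dom_multiple_returns sentence → Spec_multiple_returns sentence (multiple_returns sentence)

-- ===== LEMMAS AND PROOFS =====

-- once the counter is positive, the fold only increments it and keeps the first char fixed
theorem foldl_step_pos (t : List Char) (l : Int) (f : Option String) (hl : 0 < l) :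
    t.foldl multipleReturnsAltStep (l, f) = (l + t.length, f) := by
  induction t generalizing l with
  | nil => simp
  | cons c t ih =>
    have hne : l ≠ 0 := by omega
    simp only [List.foldl_cons, multipleReturnsAltStep, hne, reduceIte]
    rw [ih (l + 1) (by omega)]
    simp
    omega

-- ===== VERDICT (by name: the statement is the Claim_ definition above) =====
theorem multiple_returns_spec : Claim_equal_multiple_returns := by
  intro sentence _
  unfold Spec_multiple_returns multiple_returns multiple_returns_alt multipleReturnsLoop
  cases h : sentence.toList with
  | nil => simp [PySem.Str.len, h, PySem.List.pyGet?, PySem.List.pyIdx?]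
  | cons c t =>
    have hne : ((t.length : Int) + 1) ≠ 0 := by omega
    simp only [PySem.Str.len, h, List.length_cons, List.foldl_cons, multipleReturnsAltStep, ite_true]
    rw [show (0:Int) + 1 = 1 from rfl,
      foldl_step_pos t 1 (some (String.singleton c)) (by omega)]
    simp [PySem.List.pyGet?, PySem.List.pyIdx?, hne]
    omega
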